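-- pv_equiv track=rewrite | github.com/teekaytai/cs4248-project | preprocess.py | get_sentence_paragraphs
-- ===== SOURCE A (Python) =====
-- def get_sentence_paragraphs(sentences, sentence_para_positions):
--     paras = []
--     para_sentences = []
--     for idx, sentence in enumerate(sentences):
--         if int(sentence_para_positions[idx]) == 0:
--             paras.append(para_sentences)
--             para_sentences = []
--         para_sentences.append(sentence)
--     paras.append(para_sentences)
--     return paras[1:]
-- ===== SOURCE B (Python) =====
-- def get_sentence_paragraphs(sentences, sentence_para_positions):
--     # Two staged passes: first collect the boundary indices (positions whose
--     # int value is 0), then slice sentences between consecutive boundaries.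
--     # Sentences before the first boundary are never covered by a slice, and
--     # no boundary at all yields [], matching A's paras[1:] drop.
--     n = len(sentences)
--     boundaries = [i for i in range(n) if int(sentence_para_positions[i]) == 0]
--     return [sentences[b:e] for b, e in zip(boundaries, boundaries[1:] + [n])]
-- ===== Notes on version B (the rewrite author's own statement) =====
-- stated objective: alternative
-- what changed: B replaces A's single stateful accumulator loop by two staged passes: collect boundary indices where int(position)==0, then emit sentences[b:e] slices between consecutive boundaries (no paragraph accumulator, no paras[1:] drop).
import Mathlib
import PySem

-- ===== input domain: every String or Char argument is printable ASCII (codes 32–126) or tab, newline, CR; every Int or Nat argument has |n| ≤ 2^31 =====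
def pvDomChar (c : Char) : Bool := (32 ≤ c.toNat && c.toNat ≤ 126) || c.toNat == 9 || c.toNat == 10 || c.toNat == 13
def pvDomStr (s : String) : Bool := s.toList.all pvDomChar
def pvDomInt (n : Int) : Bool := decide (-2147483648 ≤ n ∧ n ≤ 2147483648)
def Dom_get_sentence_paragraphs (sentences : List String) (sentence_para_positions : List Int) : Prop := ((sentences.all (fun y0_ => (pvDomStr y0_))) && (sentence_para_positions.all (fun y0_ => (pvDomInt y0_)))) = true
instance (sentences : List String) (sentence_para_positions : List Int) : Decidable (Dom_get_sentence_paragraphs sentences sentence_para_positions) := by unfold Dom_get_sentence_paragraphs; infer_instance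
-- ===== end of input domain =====

-- B builds paragraphs by two staged passes (boundary indices, then slices) instead of A's
-- stateful accumulator loop; return values agree on Pre_ (positions at least as long as sentences).

-- ===== PORT A =====
-- left-to-right fold over enumerate(sentences), looking positions up by index;
-- pyGet? … .getD 0 is only reached with a valid index under Pre_ (Python raises IndexError otherwise)
def get_sentence_paragraphs (sentences : List String) (sentence_para_positions : List Int) : List (List String) :=
  let st := (PySem.List.enumerate sentences 0).foldl
    (fun (st : List (List String) × List String) (p : Int × String) =>
      if ((PySem.List.pyGet? sentence_para_positions p.1).getD 0) = 0 then
        (st.1 ++ [st.2], [p.2])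
      else
        (st.1, st.2 ++ [p.2]))
    ([], [])
  PySem.List.slice (st.1 ++ [st.2]) (some 1) none

-- ===== PORT B =====
-- staged passes: boundaries = [i for i in range(n) if int(positions[i]) == 0], then
-- [sentences[b:e] for b, e in zip(boundaries, boundaries[1:] + [n])]
def get_sentence_paragraphs_alt (sentences : List String) (sentence_para_positions : List Int) : List (List String) :=
  let n : Int := sentences.length
  let boundaries := (PySem.List.pyRange 0 n 1).filter
    (fun i => ((PySem.List.pyGet? sentence_para_positions i).getD 0) == 0)
  (boundaries.zip (PySem.List.slice boundaries (some 1) none ++ [n])).map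
    (fun p => PySem.List.slice sentences (some p.1) (some p.2))

-- ===== PRECONDITION & SPEC =====
-- Pre_ excludes only inputs where A raises IndexError: fewer positions than sentences.
def Pre_get_sentence_paragraphs (sentences : List String) (sentence_para_positions : List Int) : Prop :=
  sentences.length ≤ sentence_para_positions.length
instance (sentences : List String) (sentence_para_positions : List Int) : Decidable (Pre_get_sentence_paragraphs sentences sentence_para_positions) := by unfold Pre_get_sentence_paragraphs; infer_instance

def pvWitness_get_sentence_paragraphs : List String × List Int := (["a", "b", "c"], [0, 1, 0])

def Spec_get_sentence_paragraphs (sentences : List String) (sentence_para_positions : List Int) (out : List (List String)) : Prop := out = get_sentence_paragraphs_alt sentences sentence_para_positions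
instance (sentences : List String) (sentence_para_positions : List Int) (out : List (List String)) : Decidable (Spec_get_sentence_paragraphs sentences sentence_para_positions out) := by unfold Spec_get_sentence_paragraphs; infer_instance

-- ===== CLAIM (what is proved, stated in full; the proofs are below) =====
def Claim_equal_get_sentence_paragraphs : Prop := ∀ (sentences : List String) (sentence_para_positions : List Int), Dom_get_sentence_paragraphs sentences sentence_para_positions → Pre_get_sentence_paragraphs sentences sentence_para_positions → Spec_get_sentence_paragraphs sentences sentence_para_positions (get_sentence_paragraphs sentences sentence_para_positions)

-- ===== LEMMAS AND PROOFS =====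

-- A's step, over the pair list directly (positions already resolved)
def pvStepZ (st : List (List String) × List String) (p : String × Int) : List (List String) × List String :=
  if p.2 = 0 then (st.1 ++ [st.2], [p.1]) else (st.1, st.2 ++ [p.1])

-- front recursion characterising A's run: .2 = open prefix before the first marker, .1 = the paragraphs
def pvGo : List (String × Int) → List (List String) × List String
  | [] => ([], [])
  | p :: rest =>
    let r := pvGo rest
    let cur := p.1 :: r.2
    if p.2 = 0 then (cur :: r.1, []) else (r.1, cur)

-- B's intermediate data, at the Nat level: marker indices, and slices between consecutive markers
def pvZIdx : List (String × Int) → List Nat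
  | [] => []
  | p :: zs => if p.2 = 0 then 0 :: (pvZIdx zs).map (· + 1) else (pvZIdx zs).map (· + 1)

def pvSliceP (ss : List String) (bs : List Nat) (n : Nat) : List (List String) :=
  (bs.zip (bs.tail ++ [n])).map (fun p => (ss.drop p.1).take (p.2 - p.1))

-- A's enumerate-and-lookup fold equals the fold over the zipped list (positions long enough)
theorem pvFoldA_enum (ss : List String) (done rest : List Int) (st : List (List String) × List String)
    (h : ss.length ≤ rest.length) :
    (PySem.List.enumerate ss done.length).foldl
      (fun st (p : Int × String) =>
        if ((PySem.List.pyGet? (done ++ rest) p.1).getD 0) = 0 then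
          (st.1 ++ [st.2], [p.2])
        else
          (st.1, st.2 ++ [p.2])) st
    = (ss.zip rest).foldl pvStepZ st := by
  induction ss generalizing done rest st with
  | nil => simp [PySem.List.enumerate_nil]
  | cons s ss ih =>
    cases rest with
    | nil => simp at h
    | cons p rest =>
      simp only [PySem.List.enumerate_cons, List.foldl_cons, List.zip_cons_cons]
      rw [PySem.List.pyGet?_append_length]
      have hlen : ((done.length : Int) + 1) = ((done ++ [p]).length : Int) := by simp
      have happ : done ++ p :: rest = (done ++ [p]) ++ rest := by simp
      rw [hlen, happ, ih (done ++ [p]) rest _ (by simpa using h)]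
      rfl

-- the invariant connecting A's fold state with pvGo
theorem pvInvariant (zs : List (String × Int)) (paras : List (List String)) (cur : List String) :
    (zs.foldl pvStepZ (paras, cur)).1 ++ [(zs.foldl pvStepZ (paras, cur)).2]
    = paras ++ (cur ++ (pvGo zs).2) :: (pvGo zs).1 := by
  induction zs generalizing paras cur with
  | nil => simp [pvGo]
  | cons p zs ih =>
    simp only [List.foldl_cons, pvGo, pvStepZ]
    by_cases hp : p.2 = 0 <;> simp [hp, ih]

-- pvFoldA_enum specialised to start 0 and the bare positions list
theorem pvFoldA_enum0 (ss : List String) (ps : List Int) (h : ss.length ≤ ps.length) :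
    (PySem.List.enumerate ss 0).foldl
      (fun (st : List (List String) × List String) (p : Int × String) =>
        if ((PySem.List.pyGet? ps p.1).getD 0) = 0 then
          (st.1 ++ [st.2], [p.2])
        else
          (st.1, st.2 ++ [p.2])) ([], [])
    = (ss.zip ps).foldl pvStepZ ([], []) := by
  have := pvFoldA_enum ss [] ps ([], []) h
  simpa using this

-- peeling the first boundary off the slice list
theorem pvSliceP_cons (ss : List String) (a : Nat) (bs : List Nat) (n : Nat) :
    pvSliceP ss (a :: bs) n = ((ss.drop a).take (bs.headD n - a)) :: pvSliceP ss bs n := by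
  cases bs <;> simp [pvSliceP]

-- shifting every boundary by one skips the head sentence
theorem pvSliceP_shift (s : String) (ss : List String) (bs : List Nat) (n : Nat) :
    pvSliceP (s :: ss) (bs.map (· + 1)) (n + 1) = pvSliceP ss bs n := by
  unfold pvSliceP
  have htail : (bs.map (· + 1)).tail ++ [n + 1] = (bs.tail ++ [n]).map (· + 1) := by
    cases bs <;> simp
  rw [htail, List.zip_map]
  rw [List.map_map]
  apply List.map_congr_left
  intro p _
  simp [Prod.map, Nat.succ_sub_succ]

theorem pvHeadD_map_add_one (bs : List Nat) (n : Nat) :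
    (bs.map (· + 1)).headD (n + 1) = bs.headD n + 1 := by
  cases bs <;> simp

-- the central characterisation: pvGo computes exactly the slices between markers,
-- with the open prefix being everything before the first marker
theorem pvGo_spec (zs : List (String × Int)) :
    (pvGo zs).1 = pvSliceP (zs.map Prod.fst) (pvZIdx zs) zs.length ∧
    (pvGo zs).2 = (zs.map Prod.fst).take ((pvZIdx zs).headD zs.length) := by
  induction zs with
  | nil => simp [pvGo, pvZIdx, pvSliceP]
  | cons p zs ih =>
    obtain ⟨ih1, ih2⟩ := ih
    by_cases hp : p.2 = 0
    · constructor
      · simp only [pvGo, pvZIdx, hp, if_true, List.map_cons, List.length_cons]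
        rw [pvSliceP_cons, pvSliceP_shift, pvHeadD_map_add_one]
        simp [ih1, ih2, List.take_succ_cons]
      · simp [pvGo, pvZIdx, hp]
    · constructor
      · simp only [pvGo, pvZIdx, hp, if_false, List.map_cons, List.length_cons]
        rw [pvSliceP_shift]
        simpa using ih1
      · simp only [pvGo, pvZIdx, hp, if_false, List.map_cons, List.length_cons]
        rw [pvHeadD_map_add_one]
        simp [ih2, List.take_succ_cons]

-- the Nat-level boundary pass equals pvZIdx on the zipped list
theorem pvFilterIdx (ss : List String) (ps : List Int) (h : ss.length ≤ ps.length) :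
    (List.range ss.length).filter (fun k => ((ps[k]?).getD 0 == 0)) = pvZIdx (ss.zip ps) := by
  induction ss generalizing ps with
  | nil => simp [pvZIdx]
  | cons s ss ih =>
    cases ps with
    | nil => simp at h
    | cons q qs =>
      simp only [List.length_cons, List.range_succ_eq_map, List.filter_cons, List.filter_map]
      simp only [List.zip_cons_cons, pvZIdx]
      have hrest : (List.range ss.length).filter ((fun k => ((q :: qs)[k]?.getD 0 == 0)) ∘ Nat.succ)
          = (List.range ss.length).filter (fun k => (qs[k]?.getD 0 == 0)) := by
        apply List.filter_congr
        intro k _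
        simp
      rw [hrest, ih qs (by simpa using h)]
      by_cases hq : q = 0 <;> simp [hq]

-- ===== VERDICT (by name: the statement is the Claim_ definition above) =====
theorem get_sentence_paragraphs_spec : Claim_equal_get_sentence_paragraphs := by
  intro ss ps _ hpre
  have hle : ss.length ≤ ps.length := hpre
  unfold Spec_get_sentence_paragraphs
  simp only [get_sentence_paragraphs, get_sentence_paragraphs_alt]
  rw [pvFoldA_enum0 ss ps hpre, PySem.List.slice_from_one]
  have hA : ((ss.zip ps).foldl pvStepZ ([], [])).1 ++ [((ss.zip ps).foldl pvStepZ ([], [])).2]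
      = ([] ++ (pvGo (ss.zip ps)).2) :: (pvGo (ss.zip ps)).1 := by
    simpa using pvInvariant (ss.zip ps) [] []
  -- A's value is (pvGo zs).1
  have hAtail : (((ss.zip ps).foldl pvStepZ ([], [])).1 ++ [((ss.zip ps).foldl pvStepZ ([], [])).2]).tail
      = (pvGo (ss.zip ps)).1 := by rw [hA]; rfl
  rw [hAtail]
  -- B's value is pvSliceP ss (pvZIdx zs) ss.length
  have hbound : (PySem.List.pyRange 0 (ss.length : Int) 1).filter
      (fun i => ((PySem.List.pyGet? ps i).getD 0) == 0)
      = (pvZIdx (ss.zip ps)).map (Nat.cast : Nat → Int) := by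
    rw [PySem.List.pyRange_zero_natCast, List.filter_map]
    have : (List.range ss.length).filter ((fun i => ((PySem.List.pyGet? ps i).getD 0) == 0) ∘ (Nat.cast : Nat → Int))
        = (List.range ss.length).filter (fun k => ((ps[k]?).getD 0 == 0)) := by
      apply List.filter_congr
      intro k _
      simp [PySem.List.pyGet?_natCast]
    rw [this, pvFilterIdx ss ps hpre]
  rw [hbound, PySem.List.slice_from_one]
  have htail : ((pvZIdx (ss.zip ps)).map (Nat.cast : Nat → Int)).tail
      = ((pvZIdx (ss.zip ps)).tail).map (Nat.cast : Nat → Int) := by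
    cases pvZIdx (ss.zip ps) <;> rfl
  rw [htail]
  have hends : ((pvZIdx (ss.zip ps)).tail).map (Nat.cast : Nat → Int) ++ [(ss.length : Int)]
      = ((pvZIdx (ss.zip ps)).tail ++ [ss.length]).map (Nat.cast : Nat → Int) := by simp
  rw [hends, List.zip_map, List.map_map]
  have hmap : ∀ p ∈ (pvZIdx (ss.zip ps)).zip ((pvZIdx (ss.zip ps)).tail ++ [ss.length]),
      ((fun p : Int × Int => PySem.List.slice ss (some p.1) (some p.2)) ∘ Prod.map (Nat.cast : Nat → Int) (Nat.cast : Nat → Int)) p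
      = (fun p : Nat × Nat => (ss.drop p.1).take (p.2 - p.1)) p := by
    intro p _
    simp [Prod.map, PySem.List.slice_natCast]
  rw [List.map_congr_left hmap]
  have hfst : (ss.zip ps).map Prod.fst = ss := List.map_fst_zip hle
  have hlen : (ss.zip ps).length = ss.length := by
    rw [List.length_zip]; omega
  have := (pvGo_spec (ss.zip ps)).1
  rw [this, hfst, hlen]
  rfl
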